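-- pv_equiv track=rewrite | github.com/stategen/py_hoist | py_hoist/hoist_ast_util.py | split_by_brackets__
-- ===== SOURCE A (Python) =====
-- from typing import Dict, List, Optional, Tuple, Set
--
-- def split_by_brackets__(s: str) -> List[str]:
--     """Split `s` by bracketed segments, keeping bracketed parts intact.
--
--     Example:
--         'symbol_position_map[pos_contract.symbol].append' ->
--         ['symbol_position_map', '[pos_contract.symbol]', '.append']
--
--     Notes:
--     - Keeps each top-level bracketed segment ("[...]") as a single token.
--     - Keeps each top-level bracketed segment ("[...]" or "(...)") as a single token.
--     - Handles nested brackets of `[]` and `()` correctly and preserves their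
--       contents as a single token. If a matching closer is not found the
--       remainder of the string is treated as the bracket contents (same as
--       previous behavior).
--     """
--     # do not perform defensive type/emptiness checks here; let callers
--     # provide valid input and let any exceptions propagate.
--     res: List[str] = []
--     n = len(s)
--     last = 0
--     i = 0
--     while i < n:
--         ch = s[i]
--         if ch in ('[', '('):
--             # compute prefix (text before this bracket)
--             prefix = s[last : i] if i > last else ''
--
--             # determine matching closer and scan with a stack to handle nesting
--             if ch == '[':
--                 expected = ']'
--             else:
--                 expected = ')'
--             stack = [expected]
--             j = i + 1
--             while j < n and stack:
--                 cj = s[j]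
--                 if cj == '[':
--                     stack.append(']')
--                 elif cj == '(':
--                     stack.append(')')
--                 elif stack and cj == stack[-1]:
--                     stack.pop()
--                 j += 1
--
--             # j is one past the matching closer (or end of string)
--             bracket_part = s[i : j]
--
--             # If prefix ends with an identifier-like character or a closing
--             # bracket/paren, merge prefix+bracket into a single token so
--             # calls like `QDate(...).addMonths` keep `QDate(...)` together.
--             if prefix and (prefix[-1].isalnum() or prefix[-1] in '_])'):
--                 res.append(prefix + bracket_part)
--             else:
--                 if prefix:
--                     res.append(prefix)
--                 res.append(bracket_part)
--
--             last = j
--             i = j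
--         else:
--             i += 1
--
--     # append remaining tail
--     if last < n:
--         tail = s[last :]
--         if tail:
--             res.append(tail)
--     return res
-- ===== SOURCE B (Python) =====
-- from typing import List, Tuple
--
-- def _segments(s: str) -> List[Tuple[bool, str]]:
--     """Pass 1: split s into an ordered list of segments, each tagged as a
--     text run (False) or a bracket span (True, opener to one past its matched
--     closer, or to end of string if unmatched)."""
--     segs: List[Tuple[bool, str]] = []
--     buf: List[str] = []
--     i, n = 0, len(s)
--     while i < n:
--         ch = s[i]
--         if ch == '[' or ch == '(':
--             if buf:
--                 segs.append((False, ''.join(buf)))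
--                 buf = []
--             stack = [']' if ch == '[' else ')']
--             span = [ch]
--             i += 1
--             while i < n and stack:
--                 cj = s[i]
--                 if cj == '[':
--                     stack.append(']')
--                 elif cj == '(':
--                     stack.append(')')
--                 elif cj == stack[-1]:
--                     stack.pop()
--                 span.append(cj)
--                 i += 1
--             segs.append((True, ''.join(span)))
--         else:
--             buf.append(ch)
--             i += 1
--     if buf:
--         segs.append((False, ''.join(buf)))
--     return segs
--
-- def split_by_brackets__(s: str) -> List[str]:
--     """Pass 2: walk the segment list, merging a bracket span with the text
--     run just before it when that run ends in an identifier-like character."""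
--     segs = _segments(s)
--     out: List[str] = []
--     k = 0
--     while k < len(segs):
--         is_br, txt = segs[k]
--         if (not is_br) and k + 1 < len(segs) and segs[k + 1][0] and \
--                 (txt[-1].isalnum() or txt[-1] in '_])'):
--             out.append(txt + segs[k + 1][1])
--             k += 2
--         else:
--             out.append(txt)
--             k += 1
--     return out
-- ===== Notes on version B (the rewrite author's own statement) =====
-- stated objective: alternative
-- what changed: B splits the work into two passes: pass 1 segments the string into tagged text runs and bracket spans (accumulating text in a character buffer instead of index slicing), pass 2 walks the segment list and merges a bracket span with its preceding identifier-ending text run; A interleaves scanning and token emission in one index-driven loop.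
import Mathlib
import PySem

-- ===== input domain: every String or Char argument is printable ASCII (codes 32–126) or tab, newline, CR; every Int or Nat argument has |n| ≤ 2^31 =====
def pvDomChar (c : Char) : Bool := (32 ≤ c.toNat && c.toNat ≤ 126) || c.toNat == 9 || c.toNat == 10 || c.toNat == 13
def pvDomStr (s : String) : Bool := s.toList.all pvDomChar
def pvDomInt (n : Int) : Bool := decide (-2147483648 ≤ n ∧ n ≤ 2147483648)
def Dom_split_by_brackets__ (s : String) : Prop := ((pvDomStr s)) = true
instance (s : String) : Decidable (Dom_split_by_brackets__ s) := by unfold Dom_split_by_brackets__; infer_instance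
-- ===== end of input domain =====

-- B re-does A's job in two passes (segment, then merge); same output, same O(n) cost, different decomposition.

-- ===== PORT A =====
-- inner `while j < n and stack` loop of A: returns (consumed chars incl. closer, remaining suffix)
def pvScanA (stack : List Char) (cs : List Char) : List Char × List Char :=
  match stack, cs with
  | [], cs => ([], cs)
  | _ :: _, [] => ([], [])
  | t :: st, c :: cs =>
    let stack' := if c == '[' then ']' :: t :: st
                  else if c == '(' then ')' :: t :: st
                  else if c == t then st else t :: st
    let r := pvScanA stack' cs
    (c :: r.1, r.2)

theorem pvScanA_snd_len : ∀ (cs stack : List Char), (pvScanA stack cs).2.length ≤ cs.length := by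
  intro cs
  induction cs with
  | nil => intro stack; cases stack <;> simp [pvScanA]
  | cons c cs ih =>
    intro stack
    cases stack with
    | nil => simp [pvScanA]
    | cons t st =>
      simp only [pvScanA, List.length_cons]
      exact Nat.le_trans (ih _) (Nat.le_succ _)

-- prefix[-1].isalnum() or prefix[-1] in '_])'
def pvIdentCharA (c : Char) : Bool :=
  PySem.Chars.isalnum c || c == '_' || c == ']' || c == ')'

-- outer while loop of A: res = tokens so far, pending = s[last:i], rest = s[i:]
def pvLoopA (res : List String) (pending : List Char) (rest : List Char) : List String :=
  match rest with
  | [] => if pending.isEmpty then res else res ++ [String.mk pending]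
  | c :: cs =>
    if c == '[' || c == '(' then
      let expected := if c == '[' then ']' else ')'
      let r := pvScanA [expected] cs
      let bracket := c :: r.1
      let res' :=
        if !pending.isEmpty && pvIdentCharA (pending.getLastD 'x') then
          res ++ [String.mk (pending ++ bracket)]
        else
          (if pending.isEmpty then res else res ++ [String.mk pending]) ++ [String.mk bracket]
      pvLoopA res' [] r.2
    else
      pvLoopA res (pending ++ [c]) cs
termination_by rest.length
decreasing_by
  · exact Nat.lt_succ_of_le (pvScanA_snd_len cs [expected])
  · simp

def split_by_brackets__ (s : String) : List String := pvLoopA [] [] s.toList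

-- ===== PORT B =====
-- B's inner bracket scan: carries the span built so far (span.append(cj) in Source B)
def pvScanB (stack : List Char) (span : List Char) (cs : List Char) : List Char × List Char :=
  match stack, cs with
  | [], cs => (span, cs)
  | _ :: _, [] => (span, [])
  | t :: st, c :: cs =>
    pvScanB (if c == '[' then ']' :: t :: st
             else if c == '(' then ')' :: t :: st
             else if c == t then st else t :: st) (span ++ [c]) cs

theorem pvScanB_snd_len : ∀ (cs stack span : List Char), (pvScanB stack span cs).2.length ≤ cs.length := by
  intro cs
  induction cs with
  | nil => intro stack span; cases stack <;> simp [pvScanB]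
  | cons c cs ih =>
    intro stack span
    cases stack with
    | nil => simp [pvScanB]
    | cons t st =>
      simp only [pvScanB, List.length_cons]
      exact Nat.le_trans (ih _ _) (Nat.le_succ _)

-- pass 1 (_segments in Source B): segs = segments so far, buf = current text run
def pvSegs (segs : List (Bool × List Char)) (buf : List Char) (cs : List Char) :
    List (Bool × List Char) :=
  match cs with
  | [] => if buf.isEmpty then segs else segs ++ [(false, buf)]
  | c :: cs =>
    if c == '[' || c == '(' then
      let segs' := if buf.isEmpty then segs else segs ++ [(false, buf)]
      let r := pvScanB [if c == '[' then ']' else ')'] [c] cs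
      pvSegs (segs' ++ [(true, r.1)]) [] r.2
    else
      pvSegs segs (buf ++ [c]) cs
termination_by cs.length
decreasing_by
  · exact Nat.lt_succ_of_le (pvScanB_snd_len cs _ [c])
  · simp

-- pass 2 (merge loop in Source B): text run followed by a bracket span may fuse
def pvMerge (segs : List (Bool × List Char)) : List String :=
  match segs with
  | [] => []
  | (false, t) :: (true, b) :: rest =>
    if pvIdentCharA (t.getLastD 'x') then
      String.mk (t ++ b) :: pvMerge rest
    else
      String.mk t :: pvMerge ((true, b) :: rest)
  | (_, t) :: rest => String.mk t :: pvMerge rest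
termination_by segs.length
decreasing_by all_goals simp

def split_by_brackets___alt (s : String) : List String := pvMerge (pvSegs [] [] s.toList)

-- ===== PRECONDITION & SPEC =====
def Spec_split_by_brackets__ (s : String) (out : List String) : Prop := out = split_by_brackets___alt s
instance (s : String) (out : List String) : Decidable (Spec_split_by_brackets__ s out) := by unfold Spec_split_by_brackets__; infer_instance

-- ===== CLAIM (what is proved, stated in full; the proofs are below) =====
def Claim_equal_split_by_brackets__ : Prop := ∀ (s : String), Dom_split_by_brackets__ s → Spec_split_by_brackets__ s (split_by_brackets__ s)

-- ===== LEMMAS AND PROOFS =====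
theorem pvScanB_eq_pvScanA : ∀ (cs stack span : List Char),
    pvScanB stack span cs = (span ++ (pvScanA stack cs).1, (pvScanA stack cs).2) := by
  intro cs
  induction cs with
  | nil => intro stack span; cases stack <;> simp [pvScanA, pvScanB]
  | cons c cs ih =>
    intro stack span
    cases stack with
    | nil => simp [pvScanA, pvScanB]
    | cons t st => simp [pvScanA, pvScanB, ih]

theorem pvMerge_brk (b : List Char) (rest : List (Bool × List Char)) :
    pvMerge ((true, b) :: rest) = String.mk b :: pvMerge rest := by
  simp [pvMerge]

theorem pvSegs_acc : ∀ (n : Nat) (cs : List Char), cs.length ≤ n →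
    ∀ (segs : List (Bool × List Char)) (buf : List Char),
    pvSegs segs buf cs = segs ++ pvSegs [] buf cs := by
  intro n
  induction n with
  | zero =>
    intro cs h segs buf
    have hcs : cs = [] := by cases cs <;> simp_all
    subst hcs
    by_cases hb : buf.isEmpty <;> simp [pvSegs, hb]
  | succ n ih =>
    intro cs h segs buf
    cases cs with
    | nil => by_cases hb : buf.isEmpty <;> simp [pvSegs, hb]
    | cons c cs =>
      have hlen : ∀ st span, (pvScanB st span cs).2.length ≤ n :=
        fun st span => Nat.le_trans (pvScanB_snd_len cs st span) (Nat.le_of_succ_le_succ h)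
      by_cases hc : (c == '[' || c == '(') = true
      · simp only [pvSegs, hc, if_true]
        conv_lhs => rw [ih _ (hlen _ _)]
        conv_rhs => rw [ih _ (hlen _ _)]
        by_cases hb : buf.isEmpty <;> simp [hb]
      · simp only [pvSegs]
        rw [if_neg (by simp_all), if_neg (by simp_all)]
        rw [ih _ (Nat.le_of_succ_le_succ h), ih _ (Nat.le_of_succ_le_succ h)]

theorem pvLoopA_eq : ∀ (n : Nat) (rest : List Char), rest.length ≤ n →
    ∀ (res : List String) (pending : List Char),
    pvLoopA res pending rest = res ++ pvMerge (pvSegs [] pending rest) := by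
  intro n
  induction n with
  | zero =>
    intro rest h res pending
    have : rest = [] := by cases rest <;> simp_all
    subst this
    by_cases hb : pending.isEmpty <;> simp [pvLoopA, pvSegs, hb, pvMerge]
  | succ n ih =>
    intro rest h res pending
    cases rest with
    | nil => by_cases hb : pending.isEmpty <;> simp [pvLoopA, pvSegs, hb, pvMerge]
    | cons c cs =>
      have hlen : ∀ st, (pvScanA st cs).2.length ≤ n :=
        fun st => Nat.le_trans (pvScanA_snd_len cs st) (Nat.le_of_succ_le_succ h)
      by_cases hc : (c == '[' || c == '(') = true
      · simp only [pvLoopA, pvSegs, hc, if_true, pvScanB_eq_pvScanA]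
        conv_rhs => rw [pvSegs_acc n _ (hlen _)]
        conv_lhs => rw [ih _ (hlen _)]
        by_cases hb : pending.isEmpty
        · have hp : pending = [] := by cases pending <;> simp_all
          subst hp
          simp [pvMerge_brk]
        · simp [hb, pvMerge, pvIdentCharA, pvIdentCharA, pvMerge_brk]
          split_ifs <;> simp
      · simp only [pvLoopA, pvSegs]
        rw [if_neg (by simp_all), if_neg (by simp_all)]
        exact ih _ (Nat.le_of_succ_le_succ h) res (pending ++ [c])

-- ===== VERDICT (by name: the statement is the Claim_ definition above) =====
theorem split_by_brackets___spec : Claim_equal_split_by_brackets__ := by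
  intro s _
  unfold Spec_split_by_brackets__ split_by_brackets__ split_by_brackets___alt
  simpa using pvLoopA_eq s.toList.length s.toList (Nat.le_refl _) [] []
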